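-- pv_equiv track=rewrite | github.com/AllTechz/school-management-system | main.py | str_converter
-- ===== SOURCE A (Python) =====
-- def str_converter(string):
--     escape_seq_vals = {"\'": r"\'", "\"": r"\""}
--     result = ""
--     for char in string:
--         if char not in escape_seq_vals:
--             result+=char
--         else:
--             result+=escape_seq_vals[char]
--     return result
-- ===== SOURCE B (Python) =====
-- def str_converter(string):
--     return string.replace("'", r"\'").replace('"', r'\"')
-- ===== Notes on version B (the rewrite author's own statement) =====
-- stated objective: faster
-- what changed: Replaced the per-character loop with dict lookups and string concatenation by two chained str.replace substring passes (the inserted escape sequences contain neither quote character, so the passes are independent).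
import Mathlib
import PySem

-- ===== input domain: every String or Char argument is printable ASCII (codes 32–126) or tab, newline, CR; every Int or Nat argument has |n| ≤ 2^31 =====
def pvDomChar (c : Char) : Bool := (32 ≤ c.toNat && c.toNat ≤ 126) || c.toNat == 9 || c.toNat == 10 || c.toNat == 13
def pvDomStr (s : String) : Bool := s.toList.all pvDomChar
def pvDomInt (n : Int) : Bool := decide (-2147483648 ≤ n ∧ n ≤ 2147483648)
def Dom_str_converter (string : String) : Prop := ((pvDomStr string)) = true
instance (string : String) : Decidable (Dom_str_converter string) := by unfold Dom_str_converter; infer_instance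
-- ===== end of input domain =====

-- B replaces A's per-character loop (dict lookup + string concatenation) by two chained
-- str.replace substring passes; idiomatic, same exact result.

-- ===== PORT A =====
-- A iterates the characters, looking each up in the escape dict and appending either the
-- character or its escape sequence to the accumulator string.
-- A-side helper: the escape dict A builds at the top of the function
def escape_seq_vals : PySem.Dict String String :=
  PySem.Dict.mk [("'", "\\'"), ("\"", "\\\"")]

def str_converter (string : String) : String :=
  String.ofList (string.toList.foldl (fun result char =>
    if escape_seq_vals.contains (String.ofList [char]) = false then
      result ++ [char]
    else
      result ++ (escape_seq_vals.getD (String.ofList [char]) "").toList) [])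

-- ===== PORT B =====
def str_converter_alt (string : String) : String :=
  PySem.Str.replace (PySem.Str.replace string "'" "\\'") "\"" "\\\""

-- ===== PRECONDITION & SPEC =====
def Spec_str_converter (string : String) (out : String) : Prop := out = str_converter_alt string
instance (string : String) (out : String) : Decidable (Spec_str_converter string out) := by unfold Spec_str_converter; infer_instance

-- ===== CLAIM (what is proved, stated in full; the proofs are below) =====
def Claim_equal_str_converter : Prop := ∀ (string : String), Dom_str_converter string → Spec_str_converter string (str_converter string)

-- ===== LEMMAS AND PROOFS =====

-- single-character replace is a per-character substitution
theorem replace_go_single (q : Char) (new : List Char) :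
    ∀ (l acc : List Char) (fuel : Nat), l.length ≤ fuel →
      PySem.Chars.replace.go [q] new fuel l acc =
        acc.reverse ++ l.flatMap (fun c => if c = q then new else [c]) := by
  intro l
  induction l with
  | nil =>
    intro acc fuel _
    cases fuel <;> simp [PySem.Chars.replace.go]
  | cons c t ih =>
    intro acc fuel hf
    cases fuel with
    | zero => simp at hf
    | succ fuel =>
      simp only [List.length_cons, Nat.succ_le_succ_iff] at hf
      by_cases hc : c = q
      · subst hc
        have hpre : List.isPrefixOf [c] (c :: t) = true := by
          simp [List.isPrefixOf]
        simp only [PySem.Chars.replace.go, hpre, List.length_cons,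
          List.length_nil, List.drop_succ_cons, List.drop_zero, List.flatMap_cons]
        rw [ih _ fuel hf]
        simp
      · have hpre : List.isPrefixOf [q] (c :: t) = false := by
          simp only [List.isPrefixOf, Bool.and_eq_false_iff, beq_eq_false_iff_ne, ne_eq]
          exact Or.inl fun h => hc h.symm
        simp only [PySem.Chars.replace.go, hpre, Bool.false_eq_true, if_false,
          List.flatMap_cons, if_neg hc]
        rw [ih _ fuel hf]
        simp

theorem replace_single (q : Char) (new s : List Char) :
    PySem.Chars.replace s [q] new = s.flatMap (fun c => if c = q then new else [c]) := by
  simp only [PySem.Chars.replace, List.isEmpty_cons, Bool.false_eq_true, if_false]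
  simpa using replace_go_single q new s [] s.length (le_refl _)

-- A's per-character step equals one char going through both of B's substitutions
theorem strconv_g (c : Char) :
    (if escape_seq_vals.contains (String.ofList [c]) = false then [c]
     else (escape_seq_vals.getD (String.ofList [c]) "").toList) =
    (if c = '\'' then ['\\', '\''] else [c]).flatMap
      (fun d => if d = '"' then ['\\', '"'] else [d]) := by
  by_cases h1 : c = '\''
  · subst h1; decide
  · by_cases h2 : c = '"'
    · subst h2; decide
    · have hk1 : (("'" : String) == String.ofList [c]) = false := by
        simp only [beq_eq_false_iff_ne, ne_eq]
        intro h; apply h1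
        have := congrArg String.toList h; simp at this; exact this.symm
      have hk2 : (("\"" : String) == String.ofList [c]) = false := by
        simp only [beq_eq_false_iff_ne, ne_eq]
        intro h; apply h2
        have := congrArg String.toList h; simp at this; exact this.symm
      have hc : escape_seq_vals.contains (String.ofList [c]) = false := by
        simp [escape_seq_vals, PySem.Dict.contains_mk, hk1, hk2]
      simp [hc, h1, h2]

theorem str_converter_eq_alt (string : String) :
    str_converter string = str_converter_alt string := by
  unfold str_converter str_converter_alt
  have hbody : (fun (result : List Char) (char : Char) =>
      if escape_seq_vals.contains (String.ofList [char]) = false then result ++ [char]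
      else result ++ (escape_seq_vals.getD (String.ofList [char]) "").toList) =
      (fun (result : List Char) (char : Char) =>
        result ++ (if escape_seq_vals.contains (String.ofList [char]) = false then [char]
          else (escape_seq_vals.getD (String.ofList [char]) "").toList)) := by
    funext r c; split <;> rfl
  rw [hbody]
  rw [PySem.List.foldl_append_eq_flatMap
    (g := fun (char : Char) =>
      if escape_seq_vals.contains (String.ofList [char]) = false then [char]
      else (escape_seq_vals.getD (String.ofList [char]) "").toList)]
  have hB : (PySem.Str.replace (PySem.Str.replace string "'" "\\'") "\"" "\\\"").toList =
      string.toList.flatMap (fun char =>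
        (if char = '\'' then ['\\', '\''] else [char]).flatMap
          (fun d => if d = '"' then ['\\', '"'] else [d])) := by
    rw [PySem.Str.toList_replace, PySem.Str.toList_replace]
    show PySem.Chars.replace (PySem.Chars.replace string.toList ['\''] ['\\', '\''])
        ['"'] ['\\', '"'] = _
    rw [replace_single, replace_single, List.flatMap_assoc]
  rw [List.nil_append, funext strconv_g, ← hB, String.ofList_toList]

-- ===== VERDICT (by name: the statement is the Claim_ definition above) =====
theorem str_converter_spec : Claim_equal_str_converter := by
  intro s _
  unfold Spec_str_converter
  exact str_converter_eq_alt s
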